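-- pv_equiv track=rewrite | github.com/TalSchreiber95/NeuroComputation | utils.py | limit_vectors
-- ===== SOURCE A (Python) =====
-- from collections import defaultdict
--
-- def limit_vectors(X, Y, maximumInd):
--     assert len(X) == len(Y), "X and Y must have the same length"
--     counter = defaultdict(int)
--     X_limited = []
--     Y_limited = []
--     for x, y in zip(X, Y):
--         if counter[y] < maximumInd:
--             X_limited.append(x)
--             Y_limited.append(y)
--             counter[y] += 1
--     return X_limited, Y_limited
-- ===== SOURCE B (Python) =====
-- from collections import defaultdict
--
-- def limit_vectors(X, Y, maximumInd):
--     assert len(X) == len(Y), "X and Y must have the same length"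
--     positions = defaultdict(list)
--     for i, y in enumerate(Y):
--         if len(positions[y]) < maximumInd:
--             positions[y].append(i)
--     kept = sorted(i for idxs in positions.values() for i in idxs)
--     return [X[i] for i in kept], [Y[i] for i in kept]
-- ===== Notes on version B (the rewrite author's own statement) =====
-- stated objective: alternative
-- what changed: Replaces A's single stateful loop (a per-label counter dict with conditional appends to both output lists) by a group-then-gather scheme: group the first maximumInd positions of each label into a dict of index lists, sort the gathered indices to restore original order, and build both outputs by indexing X and Y at those positions.
import Mathlib
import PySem

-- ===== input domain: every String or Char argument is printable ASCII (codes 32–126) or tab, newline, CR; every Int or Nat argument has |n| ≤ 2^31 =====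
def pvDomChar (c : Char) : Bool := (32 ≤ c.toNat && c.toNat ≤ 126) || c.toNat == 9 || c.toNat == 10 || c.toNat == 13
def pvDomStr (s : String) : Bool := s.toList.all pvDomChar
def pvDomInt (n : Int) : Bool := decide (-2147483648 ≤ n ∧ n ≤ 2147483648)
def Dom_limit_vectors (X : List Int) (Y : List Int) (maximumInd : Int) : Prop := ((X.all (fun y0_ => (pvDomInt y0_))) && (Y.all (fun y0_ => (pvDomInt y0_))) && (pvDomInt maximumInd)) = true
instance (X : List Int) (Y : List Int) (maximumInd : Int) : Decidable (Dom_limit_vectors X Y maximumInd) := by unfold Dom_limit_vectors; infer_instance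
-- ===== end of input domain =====

-- B replaces A's single stateful filtering loop by group-positions-per-label / sort / gather (alternative decomposition, same return value).

-- ===== PORT A =====
-- for x, y in zip(X, Y): if counter[y] < maximumInd: append x, append y, counter[y] += 1
-- (defaultdict read counter[y] materialises the key with 0; modelled by the insert in both branches)
def limit_vectors (X : List Int) (Y : List Int) (maximumInd : Int) : List Int × List Int :=
  let st := (X.zip Y).foldl
    (fun (s : PySem.Dict Int Int × List Int × List Int) (xy : Int × Int) =>
      let c := s.1.getD xy.2 0
      if c < maximumInd then
        (s.1.insert xy.2 (c + 1), s.2.1 ++ [xy.1], s.2.2 ++ [xy.2])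
      else
        (s.1.insert xy.2 c, s.2.1, s.2.2))
    (PySem.Dict.empty, ([], []))
  (st.2.1, st.2.2)

-- ===== PORT B =====
-- for i, y in enumerate(Y): if len(positions[y]) < maximumInd: positions[y].append(i)
-- (defaultdict read positions[y] materialises the key; the in-place append is modelled by the insert)
-- kept = sorted(i for idxs in positions.values() for i in idxs); gather X and Y at kept
def limit_vectors_alt (X : List Int) (Y : List Int) (maximumInd : Int) : List Int × List Int :=
  let positions := (PySem.List.enumerate Y 0).foldl
    (fun (d : PySem.Dict Int (List Int)) (iy : Int × Int) =>
      d.insert iy.2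
        (if (((d.getD iy.2 []).length : Int)) < maximumInd
         then d.getD iy.2 [] ++ [iy.1] else d.getD iy.2 []))
    PySem.Dict.empty
  let kept := PySem.List.sorted positions.values.flatten (fun i => i)
  -- kept indices are valid nonnegative positions, so the total indexer pyGetD is exact here
  (kept.map (fun i => PySem.List.pyGetD X i 0), kept.map (fun i => PySem.List.pyGetD Y i 0))

-- ===== PRECONDITION & SPEC =====
-- A's assert raises AssertionError when len(X) ≠ len(Y); exactly those inputs are excluded.
def Pre_limit_vectors (X : List Int) (Y : List Int) (maximumInd : Int) : Prop := X.length = Y.length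
instance (X : List Int) (Y : List Int) (maximumInd : Int) : Decidable (Pre_limit_vectors X Y maximumInd) := by unfold Pre_limit_vectors; infer_instance
def pvWitness_limit_vectors : List Int × List Int × Int := ([5, 6, 7], [1, 1, 2], 1)
def Spec_limit_vectors (X : List Int) (Y : List Int) (maximumInd : Int) (out : List Int × List Int) : Prop := out = limit_vectors_alt X Y maximumInd
instance (X : List Int) (Y : List Int) (maximumInd : Int) (out : List Int × List Int) : Decidable (Spec_limit_vectors X Y maximumInd out) := by unfold Spec_limit_vectors; infer_instance

-- ===== CLAIM (what is proved, stated in full; the proofs are below) =====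
def Claim_equal_limit_vectors : Prop := ∀ (X : List Int) (Y : List Int) (maximumInd : Int), Dom_limit_vectors X Y maximumInd → Pre_limit_vectors X Y maximumInd → Spec_limit_vectors X Y maximumInd (limit_vectors X Y maximumInd)

-- ===== LEMMAS AND PROOFS =====

-- Reference computation both ports are reduced to: keep a pair when the count of its
-- second component in the prefix P (all second components seen so far) is below m.
def kp (m : Int) (P : List Int) : List (Int × Int) → List (Int × Int)
  | [] => []
  | (x, y) :: t =>
      if ((P.count y : Int)) < m then (x, y) :: kp m (P ++ [y]) t else kp m (P ++ [y]) t

lemma kp_sublist (m : Int) : ∀ (l : List (Int × Int)) (P : List Int), (kp m P l).Sublist l := by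
  intro l
  induction l with
  | nil => intro P; simp [kp]
  | cons hd t ih =>
    intro P
    obtain ⟨x, y⟩ := hd
    by_cases h : ((P.count y : Int)) < m
    · simpa [kp, h] using (ih (P ++ [y])).cons₂ (x, y)
    · simpa [kp, h] using (ih (P ++ [y])).cons (x, y)

-- ---- A-side: the fold with the counter dict computes kp ----
-- invariant: each counter entry is min(count of the label in the prefix, max m 0)
lemma foldA_eq_kp (m : Int) :
    ∀ (l : List (Int × Int)) (P : List Int) (d : PySem.Dict Int Int) (Xl Yl : List Int),
    (∀ y : Int, d.getD y 0 = min ((P.count y : Int)) (max m 0)) →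
    (l.foldl
      (fun (s : PySem.Dict Int Int × List Int × List Int) (xy : Int × Int) =>
        let c := s.1.getD xy.2 0
        if c < m then
          (s.1.insert xy.2 (c + 1), s.2.1 ++ [xy.1], s.2.2 ++ [xy.2])
        else
          (s.1.insert xy.2 c, s.2.1, s.2.2))
      (d, Xl, Yl)).2
    = (Xl ++ (kp m P l).map (·.1), Yl ++ (kp m P l).map (·.2)) := by
  intro l
  induction l with
  | nil => intro P d Xl Yl hinv; simp [kp]
  | cons hd t ih =>
    intro P d Xl Yl hinv
    obtain ⟨x, y⟩ := hd
    have hc : d.getD y 0 = min ((P.count y : Int)) (max m 0) := hinv y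
    have hcond : (d.getD y 0 < m) ↔ ((P.count y : Int) < m) := by
      rw [hc]; omega
    have hstep : ∀ v : Int, v = min (((P.count y : Int)) + 1) (max m 0) →
        ∀ z : Int, (d.insert y v).getD z 0 = min ((((P ++ [y]).count z : Int))) (max m 0) := by
      intro v hv z
      rw [PySem.Dict.getD_insert]
      by_cases hz : z = y
      · subst hz; simp [hv, List.count_append]
      · have hzy : (P ++ [y]).count z = P.count z := by
          have hyz : ¬ y = z := fun hh => hz hh.symm
          simp [List.count_append, hyz]
        simp [hz, hinv z, hzy]
    by_cases h : ((P.count y : Int)) < m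
    · have hd' : d.getD y 0 < m := hcond.mpr h
      simp only [List.foldl_cons, if_pos hd']
      rw [ih (P ++ [y]) _ _ _ (hstep (d.getD y 0 + 1) (by rw [hc]; omega))]
      simp [kp, if_pos h]
    · have hd' : ¬ d.getD y 0 < m := fun hx => h (hcond.mp hx)
      simp only [List.foldl_cons, if_neg hd']
      rw [ih (P ++ [y]) _ _ _ (hstep (d.getD y 0) (by rw [hc]; omega))]
      simp [kp, if_neg h]

-- ---- B-side ----
-- the grouping fold: each label's entry holds the first-kept indices, i.e. kp filtered to that label
lemma foldB_getD (m : Int) :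
    ∀ (E : List (Int × Int)) (P : List Int) (d : PySem.Dict Int (List Int)),
    (∀ y : Int, ((d.getD y []).length : Int) = min ((P.count y : Int)) (max m 0)) →
    ∀ y : Int,
      ((E.foldl
        (fun (d : PySem.Dict Int (List Int)) (iy : Int × Int) =>
          d.insert iy.2
            (if (((d.getD iy.2 []).length : Int)) < m
             then d.getD iy.2 [] ++ [iy.1] else d.getD iy.2 []))
        d).getD y [])
      = d.getD y [] ++ ((kp m P E).filter (fun p => p.2 == y)).map (·.1) := by
  intro E
  induction E with
  | nil => intro P d hinv y; simp [kp]
  | cons hd t ih =>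
    intro P d hinv y
    obtain ⟨i, y0⟩ := hd
    have hc := hinv y0
    have hcond : ((((d.getD y0 []).length : Int)) < m) ↔ ((P.count y0 : Int) < m) := by
      rw [hc]; omega
    have hstep : ∀ v : List Int, ((v.length : Int)) = min (((P.count y0 : Int)) + 1) (max m 0) →
        ∀ z : Int, (((d.insert y0 v).getD z []).length : Int)
          = min ((((P ++ [y0]).count z : Int))) (max m 0) := by
      intro v hv z
      rw [PySem.Dict.getD_insert]
      by_cases hz : z = y0
      · subst hz; simp [hv, List.count_append]
      · have hzy : (P ++ [y0]).count z = P.count z := by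
          have hyz : ¬ y0 = z := fun hh => hz hh.symm
          simp [List.count_append, hyz]
        simp [hz, hinv z, hzy]
    by_cases h : ((P.count y0 : Int)) < m
    · have hd' : (((d.getD y0 []).length : Int)) < m := hcond.mpr h
      simp only [List.foldl_cons, if_pos hd']
      rw [ih (P ++ [y0]) _ (hstep (d.getD y0 [] ++ [i]) (by simp; omega))]
      rw [PySem.Dict.getD_insert]
      by_cases hz : y = y0
      · subst hz; simp [kp, if_pos h, List.append_assoc]
      · have hzy : ¬ y0 = y := fun hh => hz hh.symm
        simp [kp, if_pos h, hz, hzy]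
    · have hd' : ¬ (((d.getD y0 []).length : Int)) < m := fun hx => h (hcond.mp hx)
      simp only [List.foldl_cons, if_neg hd']
      rw [ih (P ++ [y0]) _ (hstep (d.getD y0 []) (by rw [hc]; omega))]
      rw [PySem.Dict.getD_insert]
      by_cases hz : y = y0
      · subst hz; simp [kp, if_neg h]
      · simp [kp, if_neg h, hz]

-- per-label grouping lists, flattened over the distinct labels, are a permutation of the whole
lemma flatten_groups_perm :
    ∀ (S : List Int) (L : List (Int × Int)), S.Nodup → (∀ p ∈ L, p.2 ∈ S) →
    (S.map (fun y => (L.filter (fun p => p.2 == y)).map (·.1))).flatten.Perm (L.map (·.1)) := by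
  intro S
  induction S with
  | nil =>
    intro L _ hcov
    cases L with
    | nil => simp
    | cons p t => exact absurd (hcov p (by simp)) (by simp)
  | cons y S' ih =>
    intro L hnd hcov
    have hnd' : S'.Nodup := (List.nodup_cons.mp hnd).2
    have hy : y ∉ S' := (List.nodup_cons.mp hnd).1
    have hL' : ∀ p ∈ L.filter (fun p => !(p.2 == y)), p.2 ∈ S' := by
      intro p hp
      have hmem := List.mem_of_mem_filter hp
      have hne : ¬ (p.2 == y) = true := by
        have := List.of_mem_filter hp; simpa using this
      rcases List.mem_cons.mp (hcov p hmem) with h | h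
      · exact absurd (by simp [h]) hne
      · exact h
    have hsame : ∀ z ∈ S',
        (L.filter (fun p => p.2 == z)) = ((L.filter (fun p => !(p.2 == y))).filter (fun p => p.2 == z)) := by
      intro z hz
      rw [List.filter_filter]
      apply List.filter_congr
      intro p _
      by_cases hpz : p.2 = z
      · have hzy : ¬ z = y := fun hh => hy (hh ▸ hz)
        simp [hpz, hzy]
      · simp [hpz]
    have e1 : ((y :: S').map (fun z => (L.filter (fun p => p.2 == z)).map (·.1))).flatten
        = (L.filter (fun p => p.2 == y)).map (·.1)
            ++ (S'.map (fun z => (((L.filter (fun p => !(p.2 == y))).filter (fun p => p.2 == z)).map (·.1)))).flatten := by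
      simp only [List.map_cons, List.flatten_cons]
      congr 2
      exact List.map_congr_left (fun z hz => by rw [hsame z hz])
    rw [e1]
    refine (List.Perm.append_left _ (ih _ hnd' hL')).trans ?_
    rw [← List.map_append]
    exact List.Perm.map _ (List.filter_append_perm _ L)

-- gathering X (resp. Y) at the kept enumerate-indices yields the kept first (resp. second) components
lemma gather_fst (m : Int) :
    ∀ (Ts Xs pre : List Int) (P : List Int) (s : Int), s = (pre.length : Int) → Xs.length = Ts.length →
    ((kp m P (PySem.List.enumerate Ts s)).map (·.1)).map (fun i => PySem.List.pyGetD (pre ++ Xs) i 0)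
      = (kp m P (Xs.zip Ts)).map (·.1) := by
  intro Ts
  induction Ts with
  | nil => intro Xs pre P s hs h; simp [PySem.List.enumerate_nil, kp]
  | cons y t ih =>
    intro Xs pre P s hs h
    cases Xs with
    | nil => simp at h
    | cons x xs =>
      simp only [List.length_cons, Nat.succ_inj] at h
      rw [PySem.List.enumerate_cons]
      have hrec := ih xs (pre ++ [x]) (P ++ [y]) (s + 1) (by simp [hs]) h
      rw [List.append_assoc, List.singleton_append] at hrec
      have hget : PySem.List.pyGetD (pre ++ x :: xs) s 0 = x := by
        rw [hs, PySem.List.pyGetD_natCast]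
        simp [List.getD]
      simp only [kp, List.zip_cons_cons]
      by_cases hb : ((P.count y : Int)) < m
      · simp only [if_pos hb, List.map_cons]
        rw [hget, hrec]
      · simp only [if_neg hb]
        rw [hrec]

lemma gather_snd (m : Int) :
    ∀ (Ts Xs pre : List Int) (P : List Int) (s : Int), s = (pre.length : Int) → Xs.length = Ts.length →
    ((kp m P (PySem.List.enumerate Ts s)).map (·.1)).map (fun i => PySem.List.pyGetD (pre ++ Ts) i 0)
      = (kp m P (Xs.zip Ts)).map (·.2) := by
  intro Ts
  induction Ts with
  | nil => intro Xs pre P s hs h; simp [PySem.List.enumerate_nil, kp]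
  | cons y t ih =>
    intro Xs pre P s hs h
    cases Xs with
    | nil => simp at h
    | cons x xs =>
      simp only [List.length_cons, Nat.succ_inj] at h
      rw [PySem.List.enumerate_cons]
      have hrec := ih xs (pre ++ [y]) (P ++ [y]) (s + 1) (by simp [hs]) h
      rw [List.append_assoc, List.singleton_append] at hrec
      have hget : PySem.List.pyGetD (pre ++ y :: t) s 0 = y := by
        rw [hs, PySem.List.pyGetD_natCast]
        simp [List.getD]
      simp only [kp, List.zip_cons_cons]
      by_cases hb : ((P.count y : Int)) < m
      · simp only [if_pos hb, List.map_cons]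
        rw [hget, hrec]
      · simp only [if_neg hb]
        rw [hrec]

-- ===== VERDICT (by name: the statement is the Claim_ definition above) =====
theorem limit_vectors_spec : Claim_equal_limit_vectors := by
  intro X Y m _ hlen
  unfold Spec_limit_vectors
  simp only [limit_vectors, limit_vectors_alt]
  have hA := foldA_eq_kp m (X.zip Y) [] PySem.Dict.empty [] []
    (by intro y; simp [PySem.Dict.getD_empty])
  rw [hA]
  -- name the grouping dict
  set D := (PySem.List.enumerate Y 0).foldl
    (fun (d : PySem.Dict Int (List Int)) (iy : Int × Int) =>
      d.insert iy.2
        (if (((d.getD iy.2 []).length : Int)) < m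
         then d.getD iy.2 [] ++ [iy.1] else d.getD iy.2 []))
    PySem.Dict.empty with hD
  have hkeys : D.keys = PySem.Set.ofList Y := by
    rw [hD, PySem.Dict.keys_foldl_insert_key (PySem.List.enumerate Y 0) (·.2) _ PySem.Dict.empty]
    rw [PySem.List.map_snd_enumerate]
    simp [PySem.Dict.keys_empty]
    rfl
  have hnd : D.keys.Nodup := by
    rw [hD]
    exact PySem.Dict.nodup_keys_foldl_insert_key _ _ _ _ (by simp [PySem.Dict.keys_empty])
  have hget := foldB_getD m (PySem.List.enumerate Y 0) [] PySem.Dict.empty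
    (by intro y; simp [PySem.Dict.getD_empty])
  rw [← hD] at hget
  -- the flattened values are a permutation of the kept indices
  have hperm : ((kp m [] (PySem.List.enumerate Y 0)).map (·.1)).Perm D.values.flatten := by
    rw [PySem.Dict.values_eq_map_keys D hnd []]
    have : D.keys.map (fun k => D.getD k [])
        = D.keys.map (fun y => ((kp m [] (PySem.List.enumerate Y 0)).filter (fun p => p.2 == y)).map (·.1)) := by
      apply List.map_congr_left
      intro y _
      rw [hget y]
      simp [PySem.Dict.getD_empty]
    rw [this]
    refine (flatten_groups_perm D.keys (kp m [] (PySem.List.enumerate Y 0)) hnd ?_).symm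
    intro p hp
    have hmem : p ∈ PySem.List.enumerate Y 0 := (kp_sublist m _ []).mem hp
    have : p.2 ∈ Y := by
      have := List.mem_map_of_mem (f := (·.2)) hmem
      rwa [PySem.List.map_snd_enumerate] at this
    rw [hkeys]
    exact (PySem.Set.mem_ofList Y p.2).mpr this
  -- sorted names the increasing arrangement
  have hpw : ((kp m [] (PySem.List.enumerate Y 0)).map (·.1)).Pairwise (· < ·) := by
    have h1 : (PySem.List.enumerate Y 0).Pairwise (fun p q => p.1 < q.1) :=
      PySem.List.pairwise_lt_enumerate Y 0
    have h2 : (kp m [] (PySem.List.enumerate Y 0)).Pairwise (fun p q => p.1 < q.1) :=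
      h1.sublist (kp_sublist m _ [])
    exact h2.map _ (fun a b hab => hab)
  have hsorted : PySem.List.sorted D.values.flatten (fun i => i)
      = (kp m [] (PySem.List.enumerate Y 0)).map (·.1) :=
    PySem.List.sorted_eq_of_perm_of_pairwise_lt _ _ _ hperm hpw
  rw [hsorted]
  have h1 := gather_fst m Y X [] [] 0 (by simp) hlen
  have h2 := gather_snd m Y X [] [] 0 (by simp) hlen
  rw [List.nil_append] at h1 h2
  rw [h1, h2]
  simp
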